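-- pv_equiv track=rewrite | github.com/arora-aditya/aoc2019 | day16/part2.py | next_phase
-- ===== SOURCE A (Python) =====
-- def get_units_digit(num):
--     return int(abs(num))%10
--
-- def next_phase(current_phase):
--     dp = [0]*len(current_phase)
--     next_phase = [0]*len(current_phase)
--     dp[0] = current_phase[0]
--     for i in range(1, len(dp)):
--         dp[i] = dp[i-1] + current_phase[i]
--     for j in range(len(current_phase)):
--         next_phase[j] = get_units_digit(dp[-1] - dp[j] + current_phase[j])
--     return next_phase
-- ===== SOURCE B (Python) =====
-- def get_units_digit(num):
--     return int(abs(num))%10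
--
-- def next_phase(current_phase):
--     n = len(current_phase)
--     dp = [0]*n
--     dp[-1] = current_phase[-1]
--     for i in range(n-2, -1, -1):
--         dp[i] = dp[i+1] + current_phase[i]
--     return [get_units_digit(x) for x in dp]
-- ===== Notes on version B (the rewrite author's own statement) =====
-- stated objective: simpler
-- what changed: B computes the suffix sums directly with a single right-to-left accumulation instead of A's forward prefix-sum array followed by a total-minus-prefix-plus-element subtraction pass.
import Mathlib
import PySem

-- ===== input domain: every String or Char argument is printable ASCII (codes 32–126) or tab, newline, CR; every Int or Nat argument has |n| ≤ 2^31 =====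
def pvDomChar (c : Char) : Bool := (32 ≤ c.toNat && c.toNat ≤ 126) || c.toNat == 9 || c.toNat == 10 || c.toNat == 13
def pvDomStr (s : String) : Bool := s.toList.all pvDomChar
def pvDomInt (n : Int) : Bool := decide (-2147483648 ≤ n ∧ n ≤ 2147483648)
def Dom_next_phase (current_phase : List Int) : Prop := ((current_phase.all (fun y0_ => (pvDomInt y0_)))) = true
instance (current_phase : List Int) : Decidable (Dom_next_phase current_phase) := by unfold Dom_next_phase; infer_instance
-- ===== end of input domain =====

-- B replaces A's forward prefix-sum array and subtraction pass by one right-to-left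
-- suffix-sum accumulation (simpler decomposition, same O(n) cost).


-- ===== PORT A =====
def get_units_digit (num : Int) : Int := PySem.Int.mod |num| 10

-- dp array of A's first loop (forward prefix sums), kept as a named helper
def a_dp (current_phase : List Int) : List Int :=
  (PySem.List.pyRange 1 (current_phase.length : Int) 1).foldl
    (fun d i => PySem.List.pySetD d i
      (PySem.List.pyGetD d (i - 1) 0 + PySem.List.pyGetD current_phase i 0))
    (PySem.List.pySetD (List.replicate current_phase.length 0) 0
      (PySem.List.pyGetD current_phase 0 0))

def next_phase (current_phase : List Int) : List Int :=
  (PySem.List.pyRange 0 (current_phase.length : Int) 1).foldl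
    (fun a j => PySem.List.pySetD a j (get_units_digit
      (PySem.List.pyGetD (a_dp current_phase) (-1) 0
        - PySem.List.pyGetD (a_dp current_phase) j 0
        + PySem.List.pyGetD current_phase j 0)))
    (List.replicate current_phase.length 0)

-- ===== PORT B =====
-- right-to-left accumulation of suffix sums (Source B's dp array, built from the end)
def suffix_sums : List Int → List Int
  | [] => []
  | [x] => [x]
  | x :: y :: rest =>
      let s := suffix_sums (y :: rest)
      (x + s.headD 0) :: s

def next_phase_alt (current_phase : List Int) : List Int :=
  (suffix_sums current_phase).map get_units_digit

-- ===== PRECONDITION & SPEC =====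
-- Pre_ excludes only the empty list, on which the Python A raises IndexError (dp[0]).
def Pre_next_phase (current_phase : List Int) : Prop := current_phase ≠ []
instance (current_phase : List Int) : Decidable (Pre_next_phase current_phase) := by unfold Pre_next_phase; infer_instance
def pvWitness_next_phase : List Int := [8, -3, 17]

def Spec_next_phase (current_phase : List Int) (out : List Int) : Prop := out = next_phase_alt current_phase
instance (current_phase : List Int) (out : List Int) : Decidable (Spec_next_phase current_phase out) := by unfold Spec_next_phase; infer_instance

-- ===== CLAIM (what is proved, stated in full; the proofs are below) =====
def Claim_equal_next_phase : Prop := ∀ (current_phase : List Int), Dom_next_phase current_phase → Pre_next_phase current_phase → Spec_next_phase current_phase (next_phase current_phase)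

-- ===== LEMMAS AND PROOFS =====

lemma suffix_sums_length (cp : List Int) : (suffix_sums cp).length = cp.length := by
  induction cp using suffix_sums.induct with
  | case1 => rfl
  | case2 x => rfl
  | case3 x y rest ih => simp [suffix_sums, ih]

lemma headD_eq_getD_zero (l : List Int) : l.headD 0 = l.getD 0 0 := by
  cases l <;> simp [List.getD]

lemma suffix_sums_getD (cp : List Int) (j : Nat) :
    (suffix_sums cp).getD j 0 = (cp.drop j).sum := by
  induction cp using suffix_sums.induct generalizing j with
  | case1 => simp [suffix_sums]
  | case2 x =>
      cases j with
      | zero => simp [suffix_sums]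
      | succ j => simp [suffix_sums]
  | case3 x y rest ih =>
      cases j with
      | zero =>
          have h0 := ih 0
          simp only [List.drop_zero] at h0
          show ((x + (suffix_sums (y :: rest)).headD 0) :: suffix_sums (y :: rest)).getD 0 0
              = (List.drop 0 (x :: y :: rest)).sum
          rw [List.getD_cons_zero, headD_eq_getD_zero, h0]
          simp
      | succ j => simpa [suffix_sums] using ih j

lemma getD_set_ne (l : List Int) (n j : Nat) (v : Int) (h : j ≠ n) :
    (l.set n v).getD j 0 = l.getD j 0 := by
  simp [List.getD, List.getElem?_set_ne (by omega : n ≠ j)]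

lemma getD_set_self (l : List Int) (n : Nat) (v : Int) (h : n < l.length) :
    (l.set n v).getD n 0 = v := by
  simp [List.getD, h]

lemma sum_take_succ_getD (cp : List Int) (k : Nat) (h : k < cp.length) :
    (cp.take (k + 1)).sum = (cp.take k).sum + cp.getD k 0 := by
  rw [List.getD_eq_getElem cp 0 h]
  exact List.sum_take_succ cp k h

lemma suffix_eq_total_sub_prefix (cp : List Int) (j : Nat) (h : j < cp.length) :
    cp.sum - (cp.take (j + 1)).sum + cp.getD j 0 = (cp.drop j).sum := by
  have h1 := List.sum_take_add_sum_drop cp (j + 1)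
  rw [List.drop_eq_getElem_cons h, List.getD_eq_getElem cp 0 h, List.sum_cons]
  linarith

lemma pyGetD_neg_one (xs : List Int) (h : xs ≠ []) :
    PySem.List.pyGetD xs (-1) 0 = xs.getD (xs.length - 1) 0 := by
  have hl : 1 ≤ xs.length := List.length_pos_iff.mpr h
  simp [PySem.List.pyGetD, PySem.List.pyGet?, PySem.List.pyIdx?, hl, List.getD]

-- the fold of A's first loop, cut off after k iterations
def a_dp_upto (cp : List Int) (k : Nat) : List Int :=
  (PySem.List.pyRange 1 (k : Int) 1).foldl
    (fun d i => PySem.List.pySetD d i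
      (PySem.List.pyGetD d (i - 1) 0 + PySem.List.pyGetD cp i 0))
    (PySem.List.pySetD (List.replicate cp.length 0) 0 (PySem.List.pyGetD cp 0 0))

lemma a_dp_eq_upto (cp : List Int) : a_dp cp = a_dp_upto cp cp.length := rfl

-- the first loop of A builds the prefix sums
lemma dp_loop (cp : List Int) (hcp : cp ≠ []) (k : Nat) (hk1 : 1 ≤ k) (hkn : k ≤ cp.length) :
    (a_dp_upto cp k).length = cp.length
    ∧ ∀ j : Nat, (a_dp_upto cp k).getD j 0
      = if j < k then (cp.take (j + 1)).sum else 0 := by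
  have hn : 1 ≤ cp.length := List.length_pos_iff.mpr hcp
  induction k with
  | zero => omega
  | succ k ih =>
      rcases Nat.eq_zero_or_pos k with hk0 | hkpos
      · subst hk0
        rw [show a_dp_upto cp 1
            = PySem.List.pySetD (List.replicate cp.length 0) 0 (PySem.List.pyGetD cp 0 0) by
          unfold a_dp_upto
          rw [Nat.cast_one, PySem.List.pyRange_one_eq_nil le_rfl, List.foldl_nil]]
        rw [show PySem.List.pySetD (List.replicate cp.length 0) 0 (PySem.List.pyGetD cp 0 0)
            = (List.replicate cp.length 0).set 0 (PySem.List.pyGetD cp 0 0) by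
          simpa using PySem.List.pySetD_of_nonneg (List.replicate cp.length 0)
            (PySem.List.pyGetD cp 0 0) (by norm_num)]
        refine ⟨by simp, fun j => ?_⟩
        rcases Nat.eq_zero_or_pos j with hj0 | hjpos
        · subst hj0
          rw [getD_set_self _ _ _ (by simpa using hn)]
          cases cp with
          | nil => exact absurd rfl hcp
          | cons a t => simp [PySem.List.pyGetD, PySem.List.pyGet?, PySem.List.pyIdx?]
        · rw [getD_set_ne _ _ _ _ (by omega), if_neg (by omega)]
          simp only [List.getD, List.getElem?_replicate]
          split <;> rfl
      · obtain ⟨hlen, hget⟩ := ih hkpos (by omega)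
        have hsplit : a_dp_upto cp (k + 1)
            = PySem.List.pySetD (a_dp_upto cp k) (k : Int)
              (PySem.List.pyGetD (a_dp_upto cp k) ((k : Int) - 1) 0
                + PySem.List.pyGetD cp (k : Int) 0) := by
          unfold a_dp_upto
          rw [show ((k + 1 : Nat) : Int) = (k : Int) + 1 by push_cast; ring,
            PySem.List.pyRange_one_succ_right (by exact_mod_cast hkpos), List.foldl_append,
            List.foldl_cons, List.foldl_nil]
        have hcast : ((k : Int) - 1) = ((k - 1 : Nat) : Int) := by omega
        have hval : PySem.List.pyGetD (a_dp_upto cp k) ((k : Int) - 1) 0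
              + PySem.List.pyGetD cp (k : Int) 0 = (cp.take (k + 1)).sum := by
          rw [hcast, PySem.List.pyGetD_natCast, PySem.List.pyGetD_natCast, hget (k - 1),
            if_pos (by omega), show (k - 1) + 1 = k by omega]
          exact (sum_take_succ_getD cp k (by omega)).symm
        rw [hsplit, hval, PySem.List.pySetD_natCast]
        refine ⟨by simpa using hlen, fun j => ?_⟩
        rcases eq_or_ne j k with hj | hj
        · subst hj
          rw [getD_set_self _ _ _ (by omega), if_pos (by omega)]
        · rw [getD_set_ne _ _ _ _ hj, hget j]
          split_ifs <;> first | rfl | omega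

-- the second loop of A-- the second loop of A fills slot j with g j, for any index function g
lemma set_loop (g : Int → Int) (n k : Nat) (hk : k ≤ n) :
    (((PySem.List.pyRange 0 (k : Int) 1).foldl
        (fun a j => PySem.List.pySetD a j (g j)) (List.replicate n 0)).length = n)
    ∧ ∀ j : Nat,
      ((PySem.List.pyRange 0 (k : Int) 1).foldl
        (fun a j => PySem.List.pySetD a j (g j)) (List.replicate n 0)).getD j 0
      = if j < k then g (j : Int) else 0 := by
  induction k with
  | zero =>
      rw [Nat.cast_zero, PySem.List.pyRange_one_eq_nil le_rfl, List.foldl_nil]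
      refine ⟨by simp, fun j => ?_⟩
      rw [if_neg (by omega)]
      simp only [List.getD, List.getElem?_replicate]
      split <;> rfl
  | succ k ih =>
      obtain ⟨hlen, hget⟩ := ih (by omega)
      rw [show ((k + 1 : Nat) : Int) = (k : Int) + 1 by push_cast; ring,
        PySem.List.pyRange_one_succ_right (by positivity), List.foldl_append,
        List.foldl_cons, List.foldl_nil, PySem.List.pySetD_natCast]
      refine ⟨by simpa using hlen, fun j => ?_⟩
      rcases eq_or_ne j k with hj | hj
      · subst hj
        rw [getD_set_self _ _ _ (by omega), if_pos (by omega)]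
      · rw [getD_set_ne _ _ _ _ hj, hget j]
        split_ifs <;> first | rfl | omega

-- ===== VERDICT (by name: the statement is the Claim_ definition above) =====
theorem next_phase_spec : Claim_equal_next_phase := by
  intro cp _ hpre
  unfold Spec_next_phase next_phase next_phase_alt
  have hn : 1 ≤ cp.length := List.length_pos_iff.mpr hpre
  obtain ⟨hdlen, hdget⟩ := dp_loop cp hpre cp.length hn le_rfl
  rw [← a_dp_eq_upto] at hdlen hdget
  have hdnil : a_dp cp ≠ [] := by
    intro h
    rw [h] at hdlen
    simp at hdlen
    omega
  let g : Int → Int := fun j => get_units_digit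
      (PySem.List.pyGetD (a_dp cp) (-1) 0 - PySem.List.pyGetD (a_dp cp) j 0
        + PySem.List.pyGetD cp j 0)
  obtain ⟨hslen, hsget⟩ := set_loop g cp.length cp.length le_rfl
  show (PySem.List.pyRange 0 (cp.length : Int) 1).foldl
      (fun a j => PySem.List.pySetD a j (g j)) (List.replicate cp.length 0)
    = (suffix_sums cp).map get_units_digit
  apply List.ext_getElem
  · rw [hslen, List.length_map, suffix_sums_length]
  · intro j h1 h2
    have hjlen : j < cp.length := by rwa [hslen] at h1
    rw [← List.getD_eq_getElem _ 0 h1, hsget j, if_pos hjlen, List.getElem_map,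
      ← List.getD_eq_getElem _ 0 (by rwa [suffix_sums_length]), suffix_sums_getD]
    have ha : PySem.List.pyGetD (a_dp cp) (-1) 0 = cp.sum := by
      rw [pyGetD_neg_one _ hdnil, hdlen, hdget (cp.length - 1), if_pos (by omega),
        show (cp.length - 1) + 1 = cp.length by omega, List.take_length]
    have hb : PySem.List.pyGetD (a_dp cp) (j : Int) 0 = (cp.take (j + 1)).sum := by
      rw [PySem.List.pyGetD_natCast, hdget j, if_pos hjlen]
    have hc : PySem.List.pyGetD cp (j : Int) 0 = cp.getD j 0 := by
      rw [PySem.List.pyGetD_natCast]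
    show get_units_digit
        (PySem.List.pyGetD (a_dp cp) (-1) 0 - PySem.List.pyGetD (a_dp cp) (j : Int) 0
          + PySem.List.pyGetD cp (j : Int) 0) = get_units_digit ((cp.drop j).sum)
    rw [ha, hb, hc]
    exact congrArg get_units_digit (suffix_eq_total_sub_prefix cp j hjlen)
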